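-- pv_equiv track=rewrite | github.com/cnluzon/advent-of-code | src/05_binary_boarding.py | binary_lookup
-- ===== SOURCE A (Python) =====
-- def binary_lookup(bin_seq, low_token="F", high_token="B"):
--     cur_start: int = 0
--     cur_end: int = 2 ** len(bin_seq)
--
--     for b in bin_seq:
--         if b == low_token:
--             cur_end -= (cur_end - cur_start) // 2
--         elif b == high_token:
--             cur_start += (cur_end - cur_start) // 2
--
--     return cur_start
-- ===== SOURCE B (Python) =====
-- def binary_lookup(bin_seq, low_token="F", high_token="B"):
--     bits = [0 if c == low_token else 1
--             for c in bin_seq if c == low_token or c == high_token]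
--     val = sum(b << k for k, b in enumerate(reversed(bits)))
--     return val << (len(bin_seq) - len(bits))
-- ===== Notes on version B (the rewrite author's own statement) =====
-- stated objective: simpler
-- what changed: Replaces the shrinking [start,end) interval pair with staged passes: a comprehension filters the token characters into a 0/1 bit list, a positional sum over the reversed bit list gives its value, and the result is shifted left by the count of dropped non-token characters.
import Mathlib
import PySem

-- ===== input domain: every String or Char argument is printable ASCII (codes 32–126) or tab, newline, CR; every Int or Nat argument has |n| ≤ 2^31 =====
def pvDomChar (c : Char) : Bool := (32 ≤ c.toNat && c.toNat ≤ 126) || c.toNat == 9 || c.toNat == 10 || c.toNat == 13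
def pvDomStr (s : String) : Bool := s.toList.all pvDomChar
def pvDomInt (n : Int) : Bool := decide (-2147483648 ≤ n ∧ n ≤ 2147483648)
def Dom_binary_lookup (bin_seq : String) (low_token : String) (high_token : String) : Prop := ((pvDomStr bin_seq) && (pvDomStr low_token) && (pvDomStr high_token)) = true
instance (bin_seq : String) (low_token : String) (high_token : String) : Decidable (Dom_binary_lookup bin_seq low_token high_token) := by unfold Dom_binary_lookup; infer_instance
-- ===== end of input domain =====

-- B replaces A's interval narrowing with staged passes — filter the tokens to a bit list, sum the bits by position, shift by the dropped-character count (objective: simpler).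


-- ===== PORT A =====
-- one step of A's loop: halve the interval toward the low/high side
def pvStepA (low_token high_token : String) (p : Int × Int) (b : Char) : Int × Int :=
  if String.mk [b] == low_token then (p.1, p.2 - PySem.Int.floordiv (p.2 - p.1) 2)
  else if String.mk [b] == high_token then (p.1 + PySem.Int.floordiv (p.2 - p.1) 2, p.2)
  else p

def binary_lookup (bin_seq : String) (low_token : String) (high_token : String) : Int :=
  (bin_seq.toList.foldl (pvStepA low_token high_token)
    ((0 : Int), (2 : Int) ^ bin_seq.toList.length)).1

-- ===== PORT B =====
-- the comprehension: keep only token characters, as bits (low ↦ 0, else 1)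
def pvBits (low_token high_token : String) (l : List Char) : List Int :=
  (l.filter (fun c => String.mk [c] == low_token || String.mk [c] == high_token)).map
    (fun c => if String.mk [c] == low_token then (0 : Int) else 1)

-- sum(b << k for k, b in enumerate(reversed(bits)))
def pvBitVal (bits : List Int) : Int :=
  (PySem.List.enumerate bits.reverse 0).foldl (fun a p => a + p.2 * 2 ^ p.1.toNat) 0

def binary_lookup_alt (bin_seq : String) (low_token : String) (high_token : String) : Int :=
  pvBitVal (pvBits low_token high_token bin_seq.toList)
    * 2 ^ (bin_seq.toList.length - (pvBits low_token high_token bin_seq.toList).length)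

-- ===== PRECONDITION & SPEC =====
def Spec_binary_lookup (bin_seq : String) (low_token : String) (high_token : String) (out : Int) : Prop := out = binary_lookup_alt bin_seq low_token high_token
instance (bin_seq : String) (low_token : String) (high_token : String) (out : Int) : Decidable (Spec_binary_lookup bin_seq low_token high_token out) := by unfold Spec_binary_lookup; infer_instance

-- ===== CLAIM (what is proved, stated in full; the proofs are below) =====
def Claim_equal_binary_lookup : Prop := ∀ (bin_seq : String) (low_token : String) (high_token : String), Dom_binary_lookup bin_seq low_token high_token → Spec_binary_lookup bin_seq low_token high_token (binary_lookup bin_seq low_token high_token)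

-- ===== LEMMAS AND PROOFS =====

-- proof-side single-pass accumulator bridging A's interval fold and B's staged passes
def pvStepB (low_token high_token : String) (p : Int × Nat) (b : Char) : Int × Nat :=
  if String.mk [b] == low_token then (p.1 * 2, p.2)
  else if String.mk [b] == high_token then (p.1 * 2 + 1, p.2)
  else (p.1, p.2 + 1)

-- Horner evaluation of a bit list with accumulator v
def pvHorner (v : Int) (bits : List Int) : Int :=
  bits.foldl (fun a b => a * 2 + b) v

theorem pv_floordiv_pow (m : Nat) :
    PySem.Int.floordiv ((2 : Int) ^ (m + 1)) 2 = (2 : Int) ^ m := by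
  rw [PySem.Int.floordiv_eq_ediv_of_pos (by norm_num)]
  rw [pow_succ, Int.mul_ediv_cancel _ (by norm_num)]

theorem pvB_snd (lt ht : String) (l : List Char) (v : Int) (x : Nat) :
    (l.foldl (pvStepB lt ht) (v, x)).2 = x + (l.foldl (pvStepB lt ht) (v, 0)).2 := by
  induction l generalizing v x with
  | nil => simp [List.foldl]
  | cons b l ih =>
    simp only [List.foldl, pvStepB]
    split_ifs
    · exact ih (v * 2) x
    · exact ih (v * 2 + 1) x
    · rw [ih v (x + 1), ih v 1]; omega

theorem pvB_fst (lt ht : String) (l : List Char) (v : Int) (x y : Nat) :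
    (l.foldl (pvStepB lt ht) (v, x)).1 = (l.foldl (pvStepB lt ht) (v, y)).1 := by
  induction l generalizing v x y with
  | nil => rfl
  | cons b l ih =>
    simp only [List.foldl, pvStepB]
    split_ifs <;> apply ih

-- the loop invariant: A's interval is [v·2^m, (v+1)·2^m) where v is the bridge accumulator
theorem pv_main (lt ht : String) (l : List Char) (v : Int) (m : Nat)
    (hm : l.length ≤ m) :
    (l.foldl (pvStepA lt ht) (v * 2 ^ m, (v + 1) * 2 ^ m)).1
      = (l.foldl (pvStepB lt ht) (v, 0)).1
        * 2 ^ ((m - l.length) + (l.foldl (pvStepB lt ht) (v, 0)).2) := by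
  induction l generalizing v m with
  | nil => simp [List.foldl]
  | cons b l ih =>
    obtain ⟨m', rfl⟩ : ∃ m', m = m' + 1 := ⟨m - 1, by simp at hm; omega⟩
    have hl : l.length ≤ m' := by simp at hm; omega
    have hd : (v + 1) * 2 ^ (m' + 1) - v * 2 ^ (m' + 1) = 2 ^ (m' + 1) := by ring
    simp only [List.foldl, pvStepA, pvStepB]
    split_ifs with h1 h2
    · rw [hd, pv_floordiv_pow]
      have e1 : v * 2 ^ (m' + 1) = (v * 2) * 2 ^ m' := by ring
      have e2 : (v + 1) * 2 ^ (m' + 1) - 2 ^ m' = (v * 2 + 1) * 2 ^ m' := by ring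
      rw [e1, e2, ih (v * 2) m' hl]
      simp only [List.length_cons]
      congr 2
      omega
    · rw [hd, pv_floordiv_pow]
      have e1 : v * 2 ^ (m' + 1) + 2 ^ m' = (v * 2 + 1) * 2 ^ m' := by ring
      have e2 : (v + 1) * 2 ^ (m' + 1) = (v * 2 + 1 + 1) * 2 ^ m' := by ring
      rw [e1, e2, ih (v * 2 + 1) m' hl]
      simp only [List.length_cons]
      congr 2
      omega
    · rw [ih v (m' + 1) (by omega)]
      rw [pvB_fst lt ht l v 0 1, pvB_snd lt ht l v 1]
      simp only [List.length_cons]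
      congr 2
      omega

theorem pvBits_length_le (lt ht : String) (l : List Char) :
    (pvBits lt ht l).length ≤ l.length := by
  simp only [pvBits, List.length_map]
  exact List.length_filter_le _ _

-- the bridge fold's bit count = length of B's filtered bit list; its counter = dropped chars
theorem pvBits_cons_low (lt ht : String) (b : Char) (l : List Char)
    (h1 : (String.mk [b] == lt) = true) :
    pvBits lt ht (b :: l) = 0 :: pvBits lt ht l := by
  simp only [pvBits, List.filter_cons, h1, Bool.true_or, if_true, List.map_cons]

theorem pvBits_cons_high (lt ht : String) (b : Char) (l : List Char)
    (h1 : ¬ (String.mk [b] == lt) = true) (h2 : (String.mk [b] == ht) = true) :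
    pvBits lt ht (b :: l) = 1 :: pvBits lt ht l := by
  simp only [pvBits, List.filter_cons, h1, h2, Bool.false_or, if_true, List.map_cons]
  simp [h1]

theorem pvBits_cons_other (lt ht : String) (b : Char) (l : List Char)
    (h1 : ¬ (String.mk [b] == lt) = true) (h2 : ¬ (String.mk [b] == ht) = true) :
    pvBits lt ht (b :: l) = pvBits lt ht l := by
  simp [pvBits, List.filter_cons, h1, h2]

theorem pvB_fst_horner (lt ht : String) (l : List Char) (v : Int) :
    (l.foldl (pvStepB lt ht) (v, 0)).1 = pvHorner v (pvBits lt ht l) := by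
  induction l generalizing v with
  | nil => rfl
  | cons b l ih =>
    rw [List.foldl_cons]
    by_cases h1 : String.mk [b] == lt
    · rw [show pvStepB lt ht (v, 0) b = (v * 2, 0) from by simp [pvStepB, h1],
        ih (v * 2), pvBits_cons_low lt ht b l h1]
      simp [pvHorner, List.foldl]
    · by_cases h2 : String.mk [b] == ht
      · rw [show pvStepB lt ht (v, 0) b = (v * 2 + 1, 0) from by simp [pvStepB, h1, h2],
          ih (v * 2 + 1), pvBits_cons_high lt ht b l h1 h2]
        simp [pvHorner, List.foldl]
      · rw [show pvStepB lt ht (v, 0) b = (v, 1) from by simp [pvStepB, h1, h2],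
          pvB_fst lt ht l v 1 0, ih v, pvBits_cons_other lt ht b l h1 h2]

theorem pvB_snd_count (lt ht : String) (l : List Char) (v : Int) :
    (l.foldl (pvStepB lt ht) (v, 0)).2 = l.length - (pvBits lt ht l).length := by
  induction l generalizing v with
  | nil => rfl
  | cons b l ih =>
    have hle := pvBits_length_le lt ht l
    rw [List.foldl_cons]
    by_cases h1 : String.mk [b] == lt
    · rw [show pvStepB lt ht (v, 0) b = (v * 2, 0) from by simp [pvStepB, h1],
        ih (v * 2), pvBits_cons_low lt ht b l h1]
      simp
    · by_cases h2 : String.mk [b] == ht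
      · rw [show pvStepB lt ht (v, 0) b = (v * 2 + 1, 0) from by simp [pvStepB, h1, h2],
          ih (v * 2 + 1), pvBits_cons_high lt ht b l h1 h2]
        simp
      · rw [show pvStepB lt ht (v, 0) b = (v, 1) from by simp [pvStepB, h1, h2],
          pvB_snd lt ht l v 1, ih v, pvBits_cons_other lt ht b l h1 h2]
        simp only [List.length_cons]
        omega

-- Horner with accumulator shifts the accumulator past the list
theorem pvHorner_acc (v : Int) (bits : List Int) :
    pvHorner v bits = v * 2 ^ bits.length + pvHorner 0 bits := by
  induction bits generalizing v with
  | nil => simp [pvHorner]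
  | cons b bits ih =>
    have e1 : pvHorner v (b :: bits) = pvHorner (v * 2 + b) bits := rfl
    have e2 : pvHorner 0 (b :: bits) = pvHorner (0 * 2 + b) bits := rfl
    rw [e1, e2, ih (v * 2 + b), ih (0 * 2 + b), List.length_cons]
    ring

-- the enumerate-reversed positional sum is Horner evaluation
theorem pvBitVal_eq_horner (bits : List Int) :
    pvBitVal bits = pvHorner 0 bits := by
  induction bits with
  | nil => rfl
  | cons b bits ih =>
    simp only [pvBitVal, List.reverse_cons, PySem.List.enumerate_append,
      List.foldl_append] at *
    simp only [PySem.List.enumerate_cons, PySem.List.enumerate_nil, List.foldl,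
      List.length_reverse]
    rw [ih]
    have h0 : pvHorner 0 (b :: bits) = pvHorner (0 * 2 + b) bits := rfl
    rw [h0, pvHorner_acc (0 * 2 + b) bits]
    have ht : ((0 : Int) + (bits.length : Int)).toNat = bits.length := by omega
    rw [ht]
    ring

-- ===== VERDICT (by name: the statement is the Claim_ definition above) =====
theorem binary_lookup_spec : Claim_equal_binary_lookup := by
  intro bin_seq lt ht _
  unfold Spec_binary_lookup binary_lookup binary_lookup_alt
  have h := pv_main lt ht bin_seq.toList 0 bin_seq.toList.length le_rfl
  simp only [Nat.sub_self, zero_mul, zero_add, one_mul] at h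
  rw [h, pvB_fst_horner, pvB_snd_count, pvBitVal_eq_horner]
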